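-- pv_equiv track=rewrite | github.com/Thomas11411/Python-LeetCode | 2226-rings-and-rods/2226-rings-and-rods.py | countPoints
-- ===== SOURCE A (Python) =====
-- def countPoints(rings: str) -> int:
--     from collections import defaultdict
--     d = defaultdict(set)
--     res = set()
--
--     for i in range(len(rings) // 2):
--         d[rings[int(i * 2 + 1)]].add(rings[int(i * 2)])
--         if len(d[rings[int(i * 2 + 1)]]) == 3:
--             res.add(rings[int(i * 2 + 1)])
--
--     return len(res)
-- ===== SOURCE B (Python) =====
-- def countPoints(rings: str) -> int:
--     pairs = {(rings[i], rings[i - 1]) for i in range(1, len(rings), 2)}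
--     rods = {r for r, _ in pairs}
--     return sum(1 for r in rods if sum(1 for p in pairs if p[0] == r) >= 3)
-- ===== Notes on version B (the rewrite author's own statement) =====
-- stated objective: alternative
-- what changed: Drops A's dict-of-sets single scan with an incremental result set entirely: B builds the set of distinct (rod, color) pairs by comprehension, extracts the rod set, and counts rods by a nested per-rod tally of distinct pairs (no dict, no incremental trigger at size 3).
import Mathlib
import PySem

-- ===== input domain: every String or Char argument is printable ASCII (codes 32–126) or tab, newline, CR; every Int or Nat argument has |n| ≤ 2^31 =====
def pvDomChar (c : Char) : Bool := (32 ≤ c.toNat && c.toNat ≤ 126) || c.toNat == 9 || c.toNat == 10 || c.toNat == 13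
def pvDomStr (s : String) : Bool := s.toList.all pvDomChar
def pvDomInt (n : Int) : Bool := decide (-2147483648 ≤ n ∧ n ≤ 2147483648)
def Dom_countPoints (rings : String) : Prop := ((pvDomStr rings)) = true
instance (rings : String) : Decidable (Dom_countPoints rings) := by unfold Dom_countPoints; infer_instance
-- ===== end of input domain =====

-- B drops A's dict-of-sets scan with its incremental result set: it builds the set of distinct
-- (rod, color) pairs, takes the rod set, and counts rods by a nested per-rod tally of distinct
-- pairs (alternative decomposition; a timing run measured a constant-factor speedup).

-- ===== PORT A =====
-- indices i*2 and i*2+1 are always in range for i < len//2, so pyGetD with a dummy default is exact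
def countPoints (rings : String) : Int :=
  let cs := rings.toList
  let st := (PySem.List.pyRange 0 (PySem.Int.floordiv (cs.length : Int) 2) 1).foldl
      (fun (st : PySem.Dict Char (PySem.Set Char) × PySem.Set Char) i =>
        let d := st.1.modify (PySem.List.pyGetD cs (i * 2 + 1) ' ') []
          (fun s => PySem.Set.add s (PySem.List.pyGetD cs (i * 2) ' '))
        let res := if (d.getD (PySem.List.pyGetD cs (i * 2 + 1) ' ') []).length = 3
          then PySem.Set.add st.2 (PySem.List.pyGetD cs (i * 2 + 1) ' ')
          else st.2
        (d, res))
      (PySem.Dict.empty, PySem.Set.empty)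
  (st.2.length : Int)

-- ===== PORT B =====
-- indices i and i-1 are in range for i in range(1, len, 2), so pyGetD with a dummy default is exact;
-- both counting sums consume sets, but a count is independent of iteration order
def countPoints_alt (rings : String) : Int :=
  let cs := rings.toList
  let pairs : PySem.Set (Char × Char) :=
    PySem.Set.ofList ((PySem.List.pyRange 1 (cs.length : Int) 2).map
      (fun i => (PySem.List.pyGetD cs i ' ', PySem.List.pyGetD cs (i - 1) ' ')))
  let rods : PySem.Set Char := PySem.Set.ofList (pairs.map Prod.fst)
  ((rods.countP (fun r => 3 ≤ pairs.countP (fun p => p.1 == r)) : Nat) : Int)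

-- ===== PRECONDITION & SPEC =====
def Spec_countPoints (rings : String) (out : Int) : Prop := out = countPoints_alt rings
instance (rings : String) (out : Int) : Decidable (Spec_countPoints rings out) := by unfold Spec_countPoints; infer_instance

-- ===== CLAIM (what is proved, stated in full; the proofs are below) =====
def Claim_equal_countPoints : Prop := ∀ (rings : String), Dom_countPoints rings → Spec_countPoints rings (countPoints rings)

-- ===== LEMMAS AND PROOFS =====

-- the (rod, color) pairs read off the string, consumed two chars at a time
def pvPairs : List Char → List (Char × Char)
  | [] => []
  | [_] => []
  | a :: b :: t => (b, a) :: pvPairs t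

-- A's dict-building step (key = rod, value-set gains the color)
def pvStepD (d : PySem.Dict Char (PySem.Set Char)) (p : Char × Char) :
    PySem.Dict Char (PySem.Set Char) :=
  d.modify p.1 [] (fun s => PySem.Set.add s p.2)

-- A's fused step on the pair list
def pvStepA (st : PySem.Dict Char (PySem.Set Char) × PySem.Set Char) (p : Char × Char) :
    PySem.Dict Char (PySem.Set Char) × PySem.Set Char :=
  let d := pvStepD st.1 p
  (d, if (d.getD p.1 []).length = 3 then PySem.Set.add st.2 p.1 else st.2)

-- generic bridge: the Nat index loop over range(len//2) IS a fold over pvPairs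
theorem pvBridge {α : Type} (f : α → Char → Char → α) :
    ∀ (cs : List Char) (st : α),
      (List.range (cs.length / 2)).foldl
        (fun st k => f st (cs.getD (2 * k + 1) ' ') (cs.getD (2 * k) ' ')) st
      = (pvPairs cs).foldl (fun st p => f st p.1 p.2) st := by
  intro cs
  induction cs using pvPairs.induct with
  | case1 => intro st; simp [pvPairs]
  | case2 a => intro st; simp [pvPairs]
  | case3 a b t ih =>
    intro st
    have hlen : (a :: b :: t).length / 2 = t.length / 2 + 1 := by
      simp [List.length_cons]; omega
    rw [hlen, List.range_succ_eq_map, List.foldl_cons, List.foldl_map]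
    simpa [pvPairs, Nat.succ_eq_add_one, Nat.mul_add, Nat.mul_succ] using ih (f st b a)

-- converting a port's pyRange index loop to the Nat-range form pvBridge takes
theorem pvRangeForm {α : Type} (cs : List Char) (g : α → Int → α) (st : α) :
    (PySem.List.pyRange 0 (PySem.Int.floordiv (cs.length : Int) 2) 1).foldl g st
      = (List.range (cs.length / 2)).foldl (fun (st : α) (k : Nat) => g st (k : Int)) st := by
  have h2 : PySem.Int.floordiv (cs.length : Int) 2 = ((cs.length / 2 : Nat) : Int) := by
    exact_mod_cast PySem.Int.floordiv_natCast cs.length 2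
  rw [h2, PySem.List.pyRange_zero_natCast, List.foldl_map]

theorem pvGetDCast (cs : List Char) (k : Nat) :
    PySem.List.pyGetD cs ((k : Int)) ' ' = cs.getD k ' ' := by
  simp [PySem.List.pyGetD_natCast]

-- fst of A's fused fold is the plain dict fold
theorem pvFst (l : List (Char × Char)) :
    ∀ d res, (l.foldl pvStepA (d, res)).1 = l.foldl pvStepD d := by
  induction l with
  | nil => intro d res; rfl
  | cons p t ih => intro d res; simp only [List.foldl_cons]; exact ih _ _

-- invariant: res is nodup and holds exactly the keys whose color set reached size ≥ 3
def pvInv (d : PySem.Dict Char (PySem.Set Char)) (res : PySem.Set Char) : Prop :=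
  res.Nodup ∧ ∀ k, k ∈ res ↔ 3 ≤ (d.getD k []).length

theorem pvLenAdd (s : PySem.Set Char) (c : Char) :
    (PySem.Set.add s c).length = s.length ∨ (PySem.Set.add s c).length = s.length + 1 := by
  simp only [PySem.Set.add]
  split_ifs <;> simp

theorem pvIffAux (res : PySem.Set Char) (x : Char) (v : PySem.Set Char)
    (hmemx : x ∈ res ↔ 3 ≤ v.length) {w : PySem.Set Char}
    (hL : w.length = v.length ∨ w.length = v.length + 1) :
    (x ∈ if w.length = 3 then PySem.Set.add res x else res) ↔ 3 ≤ w.length := by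
  split
  · simp_all [PySem.Set.mem_add]
  · rw [hmemx]; omega

theorem pvInvStep (d : PySem.Dict Char (PySem.Set Char)) (res : PySem.Set Char)
    (p : Char × Char) (h : pvInv d res) : pvInv (pvStepA (d, res) p).1 (pvStepA (d, res) p).2 := by
  obtain ⟨hnd, hmem⟩ := h
  constructor
  · dsimp [pvStepA]
    split
    · exact PySem.Set.nodup_add _ _ hnd
    · exact hnd
  · intro k
    dsimp only [pvStepA, pvStepD]
    have hmod : ∀ k', (d.modify p.1 [] (fun s => PySem.Set.add s p.2)).getD k' [] =
        if k' = p.1 then PySem.Set.add (d.getD p.1 []) p.2 else d.getD k' [] :=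
      fun k' => PySem.Dict.getD_modify d p.1 k' [] _
    simp only [hmod, reduceIte]
    by_cases hk : k = p.1
    · rw [if_pos hk, hk]
      exact pvIffAux res p.1 (d.getD p.1 []) (hmem p.1) (pvLenAdd (d.getD p.1 []) p.2)
    · rw [if_neg hk]
      split <;> simp [PySem.Set.mem_add, hk, hmem k]

theorem pvInvFold (l : List (Char × Char)) :
    ∀ d res, pvInv d res → pvInv (l.foldl pvStepA (d, res)).1 (l.foldl pvStepA (d, res)).2 := by
  induction l with
  | nil => intro d res h; exact h
  | cons p t ih =>
    intro d res h
    simp only [List.foldl_cons]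
    have := pvInvStep d res p h
    exact (by simpa using ih _ _ this)

-- the dict's value at k: a nodup list whose members are the colors paired with k
theorem pvDictChar (l : List (Char × Char)) :
    ∀ d, (∀ k, ((d : PySem.Dict Char (PySem.Set Char)).getD k []).Nodup) →
      (∀ k, ((l.foldl pvStepD d).getD k []).Nodup) ∧
      (∀ k c, c ∈ (l.foldl pvStepD d).getD k [] ↔ c ∈ d.getD k [] ∨ (k, c) ∈ l) := by
  induction l with
  | nil => intro d hnd; exact ⟨hnd, by simp⟩
  | cons p t ih =>
    intro d hnd
    have hmod : ∀ k, (pvStepD d p).getD k [] =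
        if k = p.1 then PySem.Set.add (d.getD p.1 []) p.2 else d.getD k [] :=
      fun k => PySem.Dict.getD_modify d p.1 k [] _
    have hnd' : ∀ k, ((pvStepD d p).getD k []).Nodup := by
      intro k; rw [hmod]
      split
      · exact PySem.Set.nodup_add _ _ (hnd p.1)
      · exact hnd k
    obtain ⟨ih1, ih2⟩ := ih (pvStepD d p) hnd'
    refine ⟨by simpa using ih1, ?_⟩
    intro k c
    have := ih2 k c
    simp only [List.foldl_cons]
    rw [this, hmod, List.mem_cons]
    by_cases hk : k = p.1
    · subst hk
      rw [if_pos rfl, PySem.Set.mem_add]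
      have heq : ((p.1, c) = p) ↔ c = p.2 :=
        ⟨fun h => congrArg Prod.snd h, fun h => by rw [h]⟩
      rw [heq]; tauto
    · rw [if_neg hk]
      have heq : ((k, c) = p) ↔ False :=
        ⟨fun h => hk (congrArg Prod.fst h), False.elim⟩
      rw [heq]; tauto

-- the value-set's size at k is the number of distinct pairs with rod k
theorem pvLenEq (l : List (Char × Char)) (k : Char) :
    ((l.foldl pvStepD PySem.Dict.empty).getD k []).length
      = (PySem.Set.ofList l).countP (fun p => p.1 == k) := by
  obtain ⟨hnd, hmem⟩ := pvDictChar l PySem.Dict.empty (by simp [PySem.Dict.getD_empty])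
  have hmem' : ∀ c, c ∈ (l.foldl pvStepD PySem.Dict.empty).getD k [] ↔ (k, c) ∈ l := by
    intro c; rw [hmem k c]; simp [PySem.Dict.getD_empty]
  set L := (PySem.Set.ofList l).filter (fun p => p.1 == k) with hL
  have hLsub : L.Sublist (PySem.Set.ofList l) := List.filter_sublist
  have hLnd : L.Nodup := hLsub.nodup (PySem.Set.nodup_ofList l)
  have hLfst : ∀ p ∈ L, p.1 = k := by
    intro p hp
    have := (List.mem_filter.mp hp).2
    simpa using this
  have hmapnd : (L.map Prod.snd).Nodup := by
    refine hLnd.map_on ?_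
    intro p hp q hq hpq
    exact Prod.ext (by rw [hLfst p hp, hLfst q hq]) hpq
  have hmapmem : ∀ c, c ∈ L.map Prod.snd ↔ (k, c) ∈ l := by
    intro c
    constructor
    · intro hc
      rcases List.mem_map.mp hc with ⟨p, hp, hpc⟩
      have h1 := hLfst p hp
      have h2 : p ∈ PySem.Set.ofList l := hLsub.mem hp
      have : p = (k, c) := Prod.ext h1 hpc
      rw [← this]
      exact (PySem.Set.mem_ofList l p).mp h2
    · intro hc
      refine List.mem_map.mpr ⟨(k, c), List.mem_filter.mpr ⟨?_, by simp⟩, rfl⟩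
      exact (PySem.Set.mem_ofList l (k, c)).mpr hc
  have hperm : ((l.foldl pvStepD PySem.Dict.empty).getD k []).Perm (L.map Prod.snd) := by
    rw [List.perm_ext_iff_of_nodup (hnd k) hmapnd]
    intro c; rw [hmem' c, hmapmem c]
  rw [hperm.length_eq, List.length_map, hL, ← List.countP_eq_length_filter]

-- B's pair list, as a Nat-range map, is pvPairs
theorem pvPairsRange : ∀ cs : List Char,
    (List.range (cs.length / 2)).map
      (fun k => ((cs.getD (2 * k + 1) ' ' : Char), cs.getD (2 * k) ' '))
      = pvPairs cs := by
  intro cs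
  induction cs using pvPairs.induct with
  | case1 => simp [pvPairs]
  | case2 a => simp [pvPairs]
  | case3 a b t ih =>
    have hlen : (a :: b :: t).length / 2 = t.length / 2 + 1 := by
      simp [List.length_cons]; omega
    rw [hlen, List.range_succ_eq_map]
    simp only [List.map_cons, List.map_map]
    refine congrArg₂ _ (by simp) ?_
    rw [← ih]
    refine List.map_congr_left ?_
    intro k _
    have e2 : 2 * (k + 1) = (2 * k) + 2 := by omega
    simp [Function.comp, e2]

-- B's pair list is pvPairs
theorem pvPairsMap (cs : List Char) :
    (PySem.List.pyRange 1 (cs.length : Int) 2).map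
      (fun i => ((PySem.List.pyGetD cs i ' ' : Char), PySem.List.pyGetD cs (i - 1) ' '))
      = pvPairs cs := by
  have hm : (if (1 : Int) < (cs.length : Int)
      then (((cs.length : Int) - 1 + 2 - 1) / 2).toNat else 0) = cs.length / 2 := by
    have e : ((cs.length : Int) - 1 + 2 - 1) = (cs.length : Int) := by ring
    rw [e]; split <;> omega
  rw [PySem.List.pyRange_of_pos 1 (cs.length : Int) (by norm_num), hm, List.map_map]
  rw [← pvPairsRange cs]
  refine List.map_congr_left ?_
  intro k _
  show (PySem.List.pyGetD cs ((1 : Int) + 2 * (k : Int)) ' ',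
        PySem.List.pyGetD cs ((1 : Int) + 2 * (k : Int) - 1) ' ')
      = (cs.getD (2 * k + 1) ' ', cs.getD (2 * k) ' ')
  rw [show (1 : Int) + 2 * (k : Int) - 1 = ((2 * k : Nat) : Int) by push_cast; ring,
      show (1 : Int) + 2 * (k : Int) = ((2 * k + 1 : Nat) : Int) by push_cast; ring,
      pvGetDCast, pvGetDCast]

-- counting qualifying rods: res and the filtered rod set are the same nodup collection
theorem pvCount (l : List (Char × Char)) (res : PySem.Set Char) (hnd : res.Nodup)
    (hmem : ∀ k, k ∈ res ↔ 3 ≤ ((l.foldl pvStepD PySem.Dict.empty).getD k []).length) :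
    res.length
      = (PySem.Set.ofList ((PySem.Set.ofList l).map Prod.fst)).countP
          (fun r => 3 ≤ (PySem.Set.ofList l).countP (fun p => p.1 == r)) := by
  set S := PySem.Set.ofList l with hS
  set rods := PySem.Set.ofList (S.map Prod.fst) with hrods
  set cond : Char → Bool := fun r => 3 ≤ S.countP (fun p => p.1 == r) with hcond
  have hmem2 : ∀ k, k ∈ res ↔ 3 ≤ S.countP (fun p => p.1 == k) := by
    intro k; rw [hmem k, pvLenEq l k]
  have hfil : rods.countP cond = (rods.filter cond).length := List.countP_eq_length_filter
  have hfnd : (rods.filter cond).Nodup :=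
    (List.filter_sublist).nodup (PySem.Set.nodup_ofList _)
  have hfmem : ∀ k, k ∈ rods.filter cond ↔ cond k = true := by
    intro k
    rw [List.mem_filter]
    constructor
    · exact fun h => h.2
    · intro h
      refine ⟨?_, h⟩
      have hpos : 0 < S.countP (fun p => p.1 == k) := by
        have : (3 : Nat) ≤ S.countP (fun p => p.1 == k) := by simpa [hcond] using h
        omega
      rcases List.countP_pos_iff.mp hpos with ⟨p, hp, hpk⟩
      rw [hrods, PySem.Set.mem_ofList]
      exact List.mem_map.mpr ⟨p, hp, by simpa using hpk⟩
  have hperm : res.Perm (rods.filter cond) := by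
    rw [List.perm_ext_iff_of_nodup hnd hfnd]
    intro k
    rw [hmem2 k, hfmem k, hcond]
    simp
  rw [hperm.length_eq, hfil]

-- the whole equality, stated over the character list (the ports' bodies, lets expanded)
theorem pvMain (cs : List Char) :
    (((PySem.List.pyRange 0 (PySem.Int.floordiv (cs.length : Int) 2) 1).foldl
        (fun (st : PySem.Dict Char (PySem.Set Char) × PySem.Set Char) i =>
          let d := st.1.modify (PySem.List.pyGetD cs (i * 2 + 1) ' ') []
            (fun s => PySem.Set.add s (PySem.List.pyGetD cs (i * 2) ' '))
          let res := if (d.getD (PySem.List.pyGetD cs (i * 2 + 1) ' ') []).length = 3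
            then PySem.Set.add st.2 (PySem.List.pyGetD cs (i * 2 + 1) ' ')
            else st.2
          (d, res))
        (PySem.Dict.empty, PySem.Set.empty)).2.length : Int)
      = (((PySem.Set.ofList
            ((PySem.Set.ofList
              ((PySem.List.pyRange 1 (cs.length : Int) 2).map
                (fun i => ((PySem.List.pyGetD cs i ' ' : Char),
                  PySem.List.pyGetD cs (i - 1) ' ')))).map Prod.fst)).countP
          (fun r => 3 ≤ (PySem.Set.ofList
              ((PySem.List.pyRange 1 (cs.length : Int) 2).map
                (fun i => ((PySem.List.pyGetD cs i ' ' : Char),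
                  PySem.List.pyGetD cs (i - 1) ' ')))).countP
            (fun p => p.1 == r)) : Nat) : Int) := by
  rw [pvRangeForm]
  have hA : (List.range (cs.length / 2)).foldl
      (fun (st : PySem.Dict Char (PySem.Set Char) × PySem.Set Char) (k : Nat) =>
        let d := st.1.modify (PySem.List.pyGetD cs ((k : Int) * 2 + 1) ' ') []
          (fun s => PySem.Set.add s (PySem.List.pyGetD cs ((k : Int) * 2) ' '))
        let res := if (d.getD (PySem.List.pyGetD cs ((k : Int) * 2 + 1) ' ') []).length = 3
          then PySem.Set.add st.2 (PySem.List.pyGetD cs ((k : Int) * 2 + 1) ' ')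
          else st.2
        (d, res))
      (PySem.Dict.empty, PySem.Set.empty)
      = (pvPairs cs).foldl pvStepA (PySem.Dict.empty, PySem.Set.empty) := by
    rw [← pvBridge (fun st a b => pvStepA st (a, b)) cs]
    apply PySem.List.foldl_congr_mem
    intro st k _
    have e2 : ((k : Int) * 2) = ((2 * k : Nat) : Int) := by push_cast; ring
    have e3 : ((2 * k : Nat) : Int) + 1 = ((2 * k + 1 : Nat) : Int) := by push_cast; ring
    simp only [e2, e3, pvGetDCast, pvStepA, pvStepD]
  rw [hA, pvPairsMap cs]
  have hinv := pvInvFold (pvPairs cs) PySem.Dict.empty PySem.Set.empty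
    ⟨List.nodup_nil, by intro k; simp [PySem.Dict.getD_empty, PySem.Set.empty]⟩
  rcases hinv with ⟨hnd, hmem⟩
  rw [pvFst (pvPairs cs) PySem.Dict.empty PySem.Set.empty] at hmem
  exact_mod_cast pvCount (pvPairs cs) _ hnd hmem

-- ===== VERDICT (by name: the statement is the Claim_ definition above) =====
theorem countPoints_spec : Claim_equal_countPoints := by
  intro rings _
  unfold Spec_countPoints countPoints countPoints_alt
  exact pvMain rings.toList
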